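-- pv_equiv track=rewrite | github.com/Scorolait/Python-Advanced_Word_Finder | Projet-AWF_SINNAPPAN-LIN.py | mot_exact
-- ===== SOURCE A (Python) =====
-- def supp_ponctuation(mot):
-- 	lst=[",",".","!","?",";",":"]
-- 	i=0
-- 	new_mot=""
-- 	for i in mot:         #parcourir les caractères dans le mot
-- 		if i not in lst:  #si le caractère n'est pas une ponctuation, je le met dans une nouvelle chaîne, qui sera renvoyée à la fin
-- 			new_mot+=i
-- 	return new_mot
--
-- def mot_exact(mot,texte):
-- 	pos=1              #position
-- 	lst=texte.split()  #liste des mots du texte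
-- 	lst_pos=[]        #liste des positions du mot
-- 	if mot=="":       #sécurité si l'user n'entre rien
-- 		return lst_pos
-- 	for i in lst:
-- 		element=supp_ponctuation(i)
-- 		if element==mot:
-- 			lst_pos.append(str(pos))  #prendre toutes les positions du mot
-- 		pos+=len(i)+1
-- 	return lst_pos
-- ===== SOURCE B (Python) =====
-- def mot_exact(mot, texte):
--     # Single character-level scan of the raw text: no split(), no per-word
--     # punctuation-stripping helper.  Words are delimited in place, cleaned
--     # while being scanned, and the running position is maintained from the
--     # scanned word length.
--     if mot == "":
--         return []
--     res = []
--     pos = 1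
--     i = 0
--     n = len(texte)
--     while i < n:
--         if texte[i].isspace():
--             i += 1
--         else:
--             j = i
--             clean = []
--             while j < n and not texte[j].isspace():
--                 if texte[j] not in ',.!?;:':
--                     clean.append(texte[j])
--                 j += 1
--             if ''.join(clean) == mot:
--                 res.append(str(pos))
--             pos += (j - i) + 1
--             i = j
--     return res
-- ===== Notes on version B (the rewrite author's own statement) =====
-- stated objective: alternative
-- what changed: Replaces A's split()-then-iterate-words design (with a separate per-character punctuation-stripping helper per word) by a single character-level state-machine scan of the raw text that delimits each word in place, filters punctuation while scanning it, and derives the running position from the scanned word length.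
import Mathlib
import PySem

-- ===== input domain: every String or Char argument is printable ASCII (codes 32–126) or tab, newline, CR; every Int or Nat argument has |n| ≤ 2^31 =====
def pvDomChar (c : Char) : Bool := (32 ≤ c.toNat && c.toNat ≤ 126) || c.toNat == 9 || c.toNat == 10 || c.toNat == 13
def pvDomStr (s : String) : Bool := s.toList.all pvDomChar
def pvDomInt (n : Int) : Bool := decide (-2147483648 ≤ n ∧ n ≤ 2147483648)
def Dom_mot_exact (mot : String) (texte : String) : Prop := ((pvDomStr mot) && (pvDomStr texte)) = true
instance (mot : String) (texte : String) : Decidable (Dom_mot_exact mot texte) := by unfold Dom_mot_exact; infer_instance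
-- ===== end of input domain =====

-- B replaces A's split()-then-iterate-words design by a single character-level scan of the raw
-- text (words delimited in place, punctuation filtered while scanning); same cost, different
-- decomposition (objective: alternative).

-- ===== PORT A =====
-- punctuation list of supp_ponctuation
def pvPunctA : List Char := [',', '.', '!', '?', ';', ':']

-- supp_ponctuation: per-character loop appending non-punctuation chars (on List Char)
def suppPonctuation (mot : List Char) : List Char :=
  mot.foldl (fun new_mot i => if i ∈ pvPunctA then new_mot else new_mot ++ [i]) []

def mot_exact (mot : String) (texte : String) : List String :=
  let lst := PySem.Str.split₀ texte
  if mot = "" then []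
  else
    (lst.foldl (fun (st : Int × List String) i =>
        let element := suppPonctuation i.toList
        let lst_pos := if element = mot.toList then st.2 ++ [PySem.Int.toStr st.1] else st.2
        (st.1 + PySem.Str.len i + 1, lst_pos)) ((1 : Int), ([] : List String))).2

-- ===== PORT B =====
-- punctuation membership test of B ("texte[j] not in ',.!?;:'" negated)
def pvPunctB (c : Char) : Bool := c ∈ ([',', '.', '!', '?', ';', ':'] : List Char)

-- the outer while loop of B: skip a whitespace char, or scan one whole word in place
-- (the inner while loop advances j to the word end while collecting the cleaned chars;
-- it is transcribed as takeWhile for the scanned word and dropWhile for the rest)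
def pvScanB (mot : List Char) : List Char → Int → List String
  | [], _ => []
  | c :: rest, pos =>
    if PySem.Chars.isspace c then pvScanB mot rest pos
    else
      let w := c :: rest.takeWhile (fun x => !PySem.Chars.isspace x)
      (if w.filter (fun x => !pvPunctB x) = mot then [PySem.Int.toStr pos] else [])
        ++ pvScanB mot (rest.dropWhile (fun x => !PySem.Chars.isspace x))
            (pos + (w.length : Int) + 1)
  termination_by cs _ => cs.length
  decreasing_by
  · simp only [List.length_cons]; omega
  · simp only [List.length_cons]
    exact Nat.lt_succ_of_le (List.length_dropWhile_le _ _)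

def mot_exact_alt (mot : String) (texte : String) : List String :=
  if mot = "" then []
  else pvScanB mot.toList texte.toList 1

-- ===== PRECONDITION & SPEC =====
def Spec_mot_exact (mot : String) (texte : String) (out : List String) : Prop := out = mot_exact_alt mot texte
instance (mot : String) (texte : String) (out : List String) : Decidable (Spec_mot_exact mot texte out) := by unfold Spec_mot_exact; infer_instance

-- ===== CLAIM (what is proved, stated in full; the proofs are below) =====
def Claim_equal_mot_exact : Prop := ∀ (mot : String) (texte : String), Dom_mot_exact mot texte → Spec_mot_exact mot texte (mot_exact mot texte)

-- ===== LEMMAS AND PROOFS =====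

-- recursive characterisation of A's fold over the word list, parameterised by the start position
def pvGo (mot : List Char) (ws : List String) (p : Int) : List String :=
  match ws with
  | [] => []
  | w :: ws =>
    (if w.toList.filter (fun c => !pvPunctB c) = mot then [PySem.Int.toStr p] else [])
      ++ pvGo mot ws (p + PySem.Str.len w + 1)

-- the same over raw char-list words
def pvGoC (mot : List Char) (ws : List (List Char)) (p : Int) : List String :=
  match ws with
  | [] => []
  | w :: ws =>
    (if w.filter (fun c => !pvPunctB c) = mot then [PySem.Int.toStr p] else [])
      ++ pvGoC mot ws (p + (w.length : Int) + 1)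

-- the word list produced by B's scan structure
def pvWordsOf : List Char → List (List Char)
  | [] => []
  | c :: rest =>
    if PySem.Chars.isspace c then pvWordsOf rest
    else (c :: rest.takeWhile (fun x => !PySem.Chars.isspace x))
      :: pvWordsOf (rest.dropWhile (fun x => !PySem.Chars.isspace x))
  termination_by cs => cs.length
  decreasing_by
  · simp only [List.length_cons]; omega
  · simp only [List.length_cons]
    exact Nat.lt_succ_of_le (List.length_dropWhile_le _ _)

-- supp_ponctuation is a filter
theorem suppPonctuation_eq_filter (cs : List Char) :
    suppPonctuation cs = cs.filter (fun c => !(pvPunctB c)) := by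
  have h : ∀ (cs acc : List Char),
      cs.foldl (fun new_mot i => if i ∈ pvPunctA then new_mot else new_mot ++ [i]) acc
        = acc ++ cs.filter (fun c => !(pvPunctB c)) := by
    intro cs
    induction cs with
    | nil => simp
    | cons c cs ih =>
      intro acc
      by_cases hc : c ∈ pvPunctA
      · have hc' : pvPunctB c = true := by simpa [pvPunctB, pvPunctA] using hc
        simp [List.foldl_cons, hc, ih, hc']
      · have hc' : pvPunctB c = false := by simpa [pvPunctB, pvPunctA] using hc
        simp [List.foldl_cons, hc, ih, hc']
  simpa using h cs []

-- A's fold equals pvGo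
theorem foldA_eq_pvGo (mot : List Char) (ws : List String) (p : Int) (acc : List String) :
    (ws.foldl (fun (st : Int × List String) i =>
        let element := suppPonctuation i.toList
        let lst_pos := if element = mot then st.2 ++ [PySem.Int.toStr st.1] else st.2
        (st.1 + PySem.Str.len i + 1, lst_pos)) (p, acc)).2
      = acc ++ pvGo mot ws p := by
  induction ws generalizing p acc with
  | nil => simp [pvGo]
  | cons w ws ih =>
    simp only [List.foldl_cons, pvGo]
    rw [suppPonctuation_eq_filter]
    by_cases h : w.toList.filter (fun c => !pvPunctB c) = mot
    · simp only [h]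
      simpa using ih (p + PySem.Str.len w + 1) (acc ++ [PySem.Int.toStr p])
    · simp only [h]
      simpa using ih (p + PySem.Str.len w + 1) acc

-- pvGo over the string forms of the char-list words is pvGoC
theorem pvGo_map_ofList (mot : List Char) (ws : List (List Char)) (p : Int) :
    pvGo mot (ws.map String.ofList) p = pvGoC mot ws p := by
  induction ws generalizing p with
  | nil => simp [pvGo, pvGoC]
  | cons w ws ih =>
    simp [pvGo, pvGoC, PySem.Str.len, ih]

-- the split₀ worker, characterised by pvWordsOf
theorem split₀_go_eq (cs : List Char) : ∀ (cur : List Char) (acc : List (List Char)),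
    PySem.Chars.split₀.go cs cur acc
      = acc.reverse ++
        (if cur.isEmpty then pvWordsOf cs
         else (cur.reverse ++ cs.takeWhile (fun x => !PySem.Chars.isspace x))
           :: pvWordsOf (cs.dropWhile (fun x => !PySem.Chars.isspace x))) := by
  induction cs with
  | nil =>
    intro cur acc
    by_cases h : cur.isEmpty
    · simp [PySem.Chars.split₀.go, h, pvWordsOf]
    · simp [PySem.Chars.split₀.go, h, pvWordsOf]
  | cons c rest ih =>
    intro cur acc
    by_cases hs : PySem.Chars.isspace c
    · by_cases h : cur.isEmpty
      · have hc : cur = [] := by simpa [List.isEmpty_iff] using h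
        simp [PySem.Chars.split₀.go, hs, ih, pvWordsOf, hc]
      · simp [PySem.Chars.split₀.go, hs, h, ih, pvWordsOf, List.takeWhile, List.dropWhile]
    · by_cases h : cur.isEmpty
      · have hc : cur = [] := by simpa [List.isEmpty_iff] using h
        simp [PySem.Chars.split₀.go, hs, ih, pvWordsOf, hc]
      · simp [PySem.Chars.split₀.go, hs, h, ih]

theorem split₀_eq_pvWordsOf (cs : List Char) :
    PySem.Chars.split₀ cs = pvWordsOf cs := by
  simpa using split₀_go_eq cs [] []

-- B's scan equals pvGoC over pvWordsOf
theorem pvScanB_eq_pvGoC (mot : List Char) (cs : List Char) (p : Int) :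
    pvScanB mot cs p = pvGoC mot (pvWordsOf cs) p := by
  induction cs using pvWordsOf.induct generalizing p with
  | case1 => simp [pvScanB, pvWordsOf, pvGoC]
  | case2 c rest hs ih =>
    rw [pvScanB, pvWordsOf]
    simp only [hs, ite_true]
    exact ih p
  | case3 c rest hs ih =>
    rw [pvScanB, pvWordsOf]
    simp only [hs, ite_false, Bool.false_eq_true]
    simp [pvGoC, ih]

-- ===== VERDICT (by name: the statement is the Claim_ definition above) =====
theorem mot_exact_spec : Claim_equal_mot_exact := by
  intro mot texte _
  unfold Spec_mot_exact mot_exact mot_exact_alt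
  by_cases hm : mot = ""
  · simp [hm]
  · simp only [hm, ite_false]
    rw [foldA_eq_pvGo mot.toList (PySem.Str.split₀ texte) 1 []]
    rw [pvScanB_eq_pvGoC]
    rw [show PySem.Str.split₀ texte
        = (PySem.Chars.split₀ texte.toList).map String.ofList from rfl]
    rw [split₀_eq_pvWordsOf, pvGo_map_ofList]
    simp
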